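-- pv_equiv track=rewrite | github.com/GizawAAiT/Codeforces | A_There_Are_Two_Types_Of_Burgers.py | profit_slow
-- ===== SOURCE A (Python) =====
-- def profit_slow(b, p, f, h, c):
--     max_rev = 0
--     buns_pairs = b // 2        # total burgers possible
--     for x in range(0, min(p, buns_pairs) + 1):    # hamburgers
--         remaining_pairs = buns_pairs - x
--         y = min(f, remaining_pairs)               # chicken burgers
--         rev = x * h + y * c
--         max_rev = max(max_rev, rev)
--     return max_rev
-- ===== SOURCE B (Python) =====
-- def profit_slow(b, p, f, h, c):
--     # O(1): the revenue x*h + min(f, pairs-x)*c is piecewise linear in x,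
--     # so its maximum over [0, x_max] is attained at 0, x_max, or the
--     # breakpoint pairs - f (clamped into the interval).
--     pairs = b // 2
--     x_max = min(p, pairs)
--     if x_max < 0:
--         return 0
--     t = min(max(pairs - f, 0), x_max)
--     def g(x):
--         return x * h + min(f, pairs - x) * c
--     return max(0, g(0), g(t), g(x_max))
-- ===== Notes on version B (the rewrite author's own statement) =====
-- stated objective: faster
-- what changed: Replaced the O(min(p,b//2)) scan over all hamburger counts by an O(1) evaluation of the piecewise-linear revenue at its three candidate optima (0, the breakpoint pairs-f clamped, and x_max).
import Mathlib
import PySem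

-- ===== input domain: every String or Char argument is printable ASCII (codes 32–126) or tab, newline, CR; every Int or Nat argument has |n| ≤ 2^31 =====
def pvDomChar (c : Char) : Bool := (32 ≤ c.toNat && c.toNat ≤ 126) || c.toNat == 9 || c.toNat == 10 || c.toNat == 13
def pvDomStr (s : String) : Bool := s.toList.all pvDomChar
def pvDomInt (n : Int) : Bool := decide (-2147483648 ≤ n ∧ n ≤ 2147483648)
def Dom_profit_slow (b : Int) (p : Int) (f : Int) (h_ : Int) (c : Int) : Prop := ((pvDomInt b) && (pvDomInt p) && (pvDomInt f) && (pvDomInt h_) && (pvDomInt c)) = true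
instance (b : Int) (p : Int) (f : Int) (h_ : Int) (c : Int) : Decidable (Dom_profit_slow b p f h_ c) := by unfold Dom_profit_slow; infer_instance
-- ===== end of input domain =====

-- B replaces A's linear scan over all hamburger counts by an O(1) evaluation of the
-- piecewise-linear revenue at its three candidate optima (objective: faster).

-- ===== PORT A =====
def profit_slow (b : Int) (p : Int) (f : Int) (h_ : Int) (c : Int) : Int :=
  let buns_pairs := PySem.Int.floordiv b 2
  (PySem.List.pyRange 0 (min p buns_pairs + 1) 1).foldl
    (fun max_rev x =>
      let remaining_pairs := buns_pairs - x
      let y := min f remaining_pairs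
      let rev := x * h_ + y * c
      max max_rev rev) 0

-- ===== PORT B =====
def profit_slow_alt (b : Int) (p : Int) (f : Int) (h_ : Int) (c : Int) : Int :=
  let pairs := PySem.Int.floordiv b 2
  let x_max := min p pairs
  if x_max < 0 then 0
  else
    let t := min (max (pairs - f) 0) x_max
    let g := fun (x : Int) => x * h_ + min f (pairs - x) * c
    max (max (max 0 (g 0)) (g t)) (g x_max)

-- ===== PRECONDITION & SPEC =====
def Spec_profit_slow (b : Int) (p : Int) (f : Int) (h_ : Int) (c : Int) (out : Int) : Prop := out = profit_slow_alt b p f h_ c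
instance (b : Int) (p : Int) (f : Int) (h_ : Int) (c : Int) (out : Int) : Decidable (Spec_profit_slow b p f h_ c out) := by unfold Spec_profit_slow; infer_instance

-- ===== CLAIM (what is proved, stated in full; the proofs are below) =====
def Claim_equal_profit_slow : Prop := ∀ (b : Int) (p : Int) (f : Int) (h_ : Int) (c : Int), Dom_profit_slow b p f h_ c → Spec_profit_slow b p f h_ c (profit_slow b p f h_ c)

-- ===== LEMMAS AND PROOFS =====

-- the initial accumulator is a lower bound of the running-max fold
theorem pv_foldl_max_init (g : Int → Int) : ∀ (l : List Int) (a : Int),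
    a ≤ l.foldl (fun m x => max m (g x)) a := by
  intro l
  induction l with
  | nil => intro a; exact le_refl a
  | cons y l ih => intro a; exact le_trans (le_max_left a (g y)) (ih (max a (g y)))

-- every visited value is a lower bound of the running-max fold
theorem pv_foldl_max_of_mem (g : Int → Int) : ∀ (l : List Int) (a x : Int), x ∈ l →
    g x ≤ l.foldl (fun m x => max m (g x)) a := by
  intro l
  induction l with
  | nil => intro a x hx; cases hx
  | cons y l ih =>
    intro a x hx
    rcases List.mem_cons.mp hx with h | h
    · subst h; exact le_trans (le_max_right a (g x)) (pv_foldl_max_init g l _)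
    · exact ih _ x h

-- the running-max fold returns either the initial accumulator or some visited value
theorem pv_foldl_max_cases (g : Int → Int) : ∀ (l : List Int) (a : Int),
    l.foldl (fun m x => max m (g x)) a = a ∨
      ∃ x, x ∈ l ∧ l.foldl (fun m x => max m (g x)) a = g x := by
  intro l
  induction l with
  | nil => intro a; exact Or.inl rfl
  | cons y l ih =>
    intro a
    rcases ih (max a (g y)) with h | ⟨x, hx, h⟩
    · rcases max_choice a (g y) with hm | hm
      · exact Or.inl (by simp only [List.foldl_cons]; rw [h, hm])
      · exact Or.inr ⟨y, List.mem_cons_self, by simp only [List.foldl_cons]; rw [h, hm]⟩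
    · exact Or.inr ⟨x, List.mem_cons_of_mem _ hx, by simp only [List.foldl_cons]; exact h⟩

-- the revenue at any feasible x is bounded by the revenues at the three candidate points
theorem pv_key (pairs f h_ c X x : Int) (hx0 : 0 ≤ x) (hxX : x ≤ X) :
    x * h_ + min f (pairs - x) * c ≤
      max (max (max 0 (0 * h_ + min f (pairs - 0) * c))
        ((min (max (pairs - f) 0) X) * h_ + min f (pairs - (min (max (pairs - f) 0) X)) * c))
        (X * h_ + min f (pairs - X) * c) := by
  set t := min (max (pairs - f) 0) X with ht
  rcases le_or_gt f (pairs - x) with hcase | hcase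
  · -- flat piece: y = f throughout [0, t]
    have e1 : min f (pairs - x) = f := by omega
    have e0 : min f (pairs - 0) = f := by omega
    have hxt : x ≤ t := by omega
    have et : min f (pairs - t) = f := by omega
    rcases le_or_gt 0 h_ with hh | hh
    · have hm : x * h_ ≤ t * h_ := mul_le_mul_of_nonneg_right hxt hh
      refine le_trans ?_ (le_trans (le_max_right _ _) (le_max_left _ _))
      rw [e1, et]; linarith
    · have hm : x * h_ ≤ 0 * h_ := mul_le_mul_of_nonpos_right hx0 (le_of_lt hh)
      refine le_trans ?_ (le_trans (le_trans (le_max_right _ _) (le_max_left _ _)) (le_max_left _ _))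
      rw [e1, e0]; linarith
  · -- sloped piece: y = pairs - x throughout [t, X]
    have e1 : min f (pairs - x) = pairs - x := by omega
    have htx : t ≤ x := by omega
    have et : min f (pairs - t) = pairs - t := by omega
    have eX : min f (pairs - X) = pairs - X := by omega
    rcases le_or_gt c h_ with hh | hh
    · have hm : x * (h_ - c) ≤ X * (h_ - c) := mul_le_mul_of_nonneg_right hxX (by omega)
      refine le_trans ?_ (le_max_right _ _)
      rw [e1, eX]; nlinarith
    · have hm : x * (h_ - c) ≤ t * (h_ - c) := mul_le_mul_of_nonpos_right htx (by omega)
      refine le_trans ?_ (le_trans (le_max_right _ _) (le_max_left _ _))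
      rw [e1, et]; nlinarith

-- ===== VERDICT (by name: the statement is the Claim_ definition above) =====
theorem profit_slow_spec : Claim_equal_profit_slow := by
  intro b p f h_ c _
  unfold Spec_profit_slow profit_slow profit_slow_alt
  dsimp only
  set pairs := PySem.Int.floordiv b 2 with hpairs
  set X := min p pairs with hX
  set g := fun (x : Int) => x * h_ + min f (pairs - x) * c with hg
  by_cases hneg : X < 0
  · rw [PySem.List.pyRange_one_eq_nil (by omega), if_pos hneg]
    rfl
  · rw [if_neg hneg]
    have hXp : X ≤ pairs := min_le_right p pairs
    have h0X : (0:Int) ≤ X := by omega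
    set t := min (max (pairs - f) 0) X with htdef
    have ht0 : 0 ≤ t := by omega
    have htX : t ≤ X := by omega
    set L := PySem.List.pyRange 0 (X + 1) 1 with hL
    have hmem : ∀ x : Int, 0 ≤ x → x ≤ X → x ∈ L := by
      intro x hx0 hxX
      exact (PySem.List.mem_pyRange_one).mpr ⟨hx0, by omega⟩
    apply le_antisymm
    · rcases pv_foldl_max_cases g L 0 with h | ⟨x, hx, h⟩
      · rw [h]
        exact le_trans (le_max_left 0 _) (le_trans (le_max_left _ _) (le_max_left _ _))
      · rw [h]
        have := (PySem.List.mem_pyRange_one).mp (hL ▸ hx)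
        exact pv_key pairs f h_ c X x this.1 (by omega)
    · apply max_le
      apply max_le
      apply max_le
      · exact pv_foldl_max_init g L 0
      · exact pv_foldl_max_of_mem g L 0 0 (hmem 0 le_rfl h0X)
      · exact pv_foldl_max_of_mem g L 0 t (hmem t ht0 htX)
      · exact pv_foldl_max_of_mem g L 0 X (hmem X h0X le_rfl)
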